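-- pv_equiv track=rewrite | github.com/Anrahya/cbic-clanker-review | clanker_zone/domains/gst/dossiers.py | _descendant_span
-- ===== SOURCE A (Python) =====
-- from typing import Any, Dict, List, Optional, Set, Tuple
--
-- NodePair = Tuple[Dict[str, Any], str]
--
-- def _descendant_span(node_pairs: List[NodePair]) -> Tuple[Optional[int], Optional[int]]:
--     starts: List[int] = []
--     ends: List[int] = []
--     for node, _ in node_pairs:
--         source_ref = node.get("source_ref") or {}
--         start = source_ref.get("start_block")
--         end = source_ref.get("end_block")
--         if start:
--             starts.append(start)
--         if end:
--             ends.append(end)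
--     if not starts or not ends:
--         return None, None
--     return min(starts), max(ends)
-- ===== SOURCE B (Python) =====
-- from typing import Any, Dict, List, Optional, Tuple
--
-- NodePair = Tuple[Dict[str, Any], str]
--
-- def _descendant_span(node_pairs: List[NodePair]) -> Tuple[Optional[int], Optional[int]]:
--     # Divide and conquer: recursively split the list in half, compute the
--     # optional (min_start, max_end) span of each half and merge them; min/max
--     # are associative-commutative, so the split order does not matter.
--     def spans(lo: int, hi: int) -> Tuple[Optional[int], Optional[int]]:
--         if hi - lo == 0:
--             return None, None
--         if hi - lo == 1:
--             node, _ = node_pairs[lo]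
--             source_ref = node.get("source_ref") or {}
--             start = source_ref.get("start_block")
--             end = source_ref.get("end_block")
--             return (start if start else None), (end if end else None)
--         mid = (lo + hi) // 2
--         s1, e1 = spans(lo, mid)
--         s2, e2 = spans(mid, hi)
--         s = s1 if s2 is None else (s2 if s1 is None else min(s1, s2))
--         e = e1 if e2 is None else (e2 if e1 is None else max(e1, e2))
--         return s, e
--
--     s, e = spans(0, len(node_pairs))
--     if s is None or e is None:
--         return None, None
--     return s, e
-- ===== Notes on version B (the rewrite author's own statement) =====
-- stated objective: alternative
-- what changed: Replaced collect-into-two-lists-then-min/max by a recursive divide-and-conquer that splits the node list in half, computes each half's optional (min_start, max_end) span, and merges them with optional min/max; a final check maps a missing side to (None, None).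
import Mathlib
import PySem

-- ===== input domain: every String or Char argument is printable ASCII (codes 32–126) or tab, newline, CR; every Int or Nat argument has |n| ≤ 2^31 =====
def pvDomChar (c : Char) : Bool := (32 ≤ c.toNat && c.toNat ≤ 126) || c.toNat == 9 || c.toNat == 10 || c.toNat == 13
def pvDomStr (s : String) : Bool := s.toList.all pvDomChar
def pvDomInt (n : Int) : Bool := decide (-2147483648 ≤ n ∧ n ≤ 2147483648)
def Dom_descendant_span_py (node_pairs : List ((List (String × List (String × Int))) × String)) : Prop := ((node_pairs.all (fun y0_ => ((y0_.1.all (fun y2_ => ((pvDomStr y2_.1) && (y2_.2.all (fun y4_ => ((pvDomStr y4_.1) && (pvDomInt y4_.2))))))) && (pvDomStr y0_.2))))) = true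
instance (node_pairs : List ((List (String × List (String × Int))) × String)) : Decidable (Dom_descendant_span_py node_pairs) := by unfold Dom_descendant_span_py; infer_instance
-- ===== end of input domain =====

-- B replaces A's collect-two-lists-then-min/max by a recursive divide-and-conquer over index
-- ranges that merges each half's optional span (objective: alternative decomposition).

-- ===== PORT A =====
-- loop body of A: append start to starts / end to ends when truthy (nonzero)
def pvStepA (acc : List Int × List Int)
    (p : (List (String × List (String × Int))) × String) : List Int × List Int :=
  -- 'node.get("source_ref") or {}': none and the empty dict both yield {} = getD []
  let source_ref := ((PySem.Dict.mk p.1).get? "source_ref").getD []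
  let start := (PySem.Dict.mk source_ref).get? "start_block"
  let end_ := (PySem.Dict.mk source_ref).get? "end_block"
  let starts := match start with
    | some s => if s ≠ 0 then acc.1 ++ [s] else acc.1
    | none => acc.1
  let ends := match end_ with
    | some e => if e ≠ 0 then acc.2 ++ [e] else acc.2
    | none => acc.2
  (starts, ends)

def descendant_span_py (node_pairs : List ((List (String × List (String × Int))) × String)) : Option Int × Option Int :=
  let se := node_pairs.foldl pvStepA ([], [])
  if se.1 = [] ∨ se.2 = [] then (none, none)
  else (PySem.List.min? se.1 (fun x => x), PySem.List.max? se.2 (fun x => x))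

-- ===== PORT B =====
-- B's merge of two optional starts: 's1 if s2 is None else (s2 if s1 is None else min(s1, s2))'
def pvOmin (a b : Option Int) : Option Int :=
  match b with
  | none => a
  | some y => match a with | none => some y | some x => some (min x y)

-- B's merge of two optional ends
def pvOmax (a b : Option Int) : Option Int :=
  match b with
  | none => a
  | some y => match a with | none => some y | some x => some (max x y)

-- B's inner 'spans(lo, hi)': divide and conquer on the half-open index range [lo, hi)
def pvSpans (np : List ((List (String × List (String × Int))) × String))
    (lo hi : Nat) : Option Int × Option Int :=
  if hi - lo = 0 then (none, none)
  else if hi - lo = 1 then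
    -- node_pairs[lo]: lo is always in range here (B keeps 0 ≤ lo < hi ≤ len)
    let node := (np[lo]?.getD ([], "")).1
    let source_ref := ((PySem.Dict.mk node).get? "source_ref").getD []
    let start := (PySem.Dict.mk source_ref).get? "start_block"
    let end_ := (PySem.Dict.mk source_ref).get? "end_block"
    ((match start with | some s => if s ≠ 0 then some s else none | none => none),
     (match end_ with | some e => if e ≠ 0 then some e else none | none => none))
  else
    let mid := (lo + hi) / 2
    let p1 := pvSpans np lo mid
    let p2 := pvSpans np mid hi
    (pvOmin p1.1 p2.1, pvOmax p1.2 p2.2)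
termination_by hi - lo
decreasing_by all_goals omega

def descendant_span_py_alt (node_pairs : List ((List (String × List (String × Int))) × String)) : Option Int × Option Int :=
  let se := pvSpans node_pairs 0 node_pairs.length
  if se.1 = none ∨ se.2 = none then (none, none)
  else (se.1, se.2)

-- ===== PRECONDITION & SPEC =====
def Spec_descendant_span_py (node_pairs : List ((List (String × List (String × Int))) × String)) (out : Option Int × Option Int) : Prop := out = descendant_span_py_alt node_pairs
instance (node_pairs : List ((List (String × List (String × Int))) × String)) (out : Option Int × Option Int) : Decidable (Spec_descendant_span_py node_pairs out) := by unfold Spec_descendant_span_py; infer_instance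

-- ===== CLAIM =====
def Claim_equal_descendant_span_py : Prop := ∀ (node_pairs : List ((List (String × List (String × Int))) × String)), Dom_descendant_span_py node_pairs → Spec_descendant_span_py node_pairs (descendant_span_py node_pairs)

-- ===== LEMMAS AND PROOFS =====

-- the starts / ends A's loop body contributes for one node pair
def pvLeafS (p : (List (String × List (String × Int))) × String) : List Int :=
  match (PySem.Dict.mk (((PySem.Dict.mk p.1).get? "source_ref").getD [])).get? "start_block" with
  | some s => if s ≠ 0 then [s] else []
  | none => []

def pvLeafE (p : (List (String × List (String × Int))) × String) : List Int :=
  match (PySem.Dict.mk (((PySem.Dict.mk p.1).get? "source_ref").getD [])).get? "end_block" with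
  | some e => if e ≠ 0 then [e] else []
  | none => []

theorem pvStepA_eq (acc : List Int × List Int) (p : (List (String × List (String × Int))) × String) :
    pvStepA acc p = (acc.1 ++ pvLeafS p, acc.2 ++ pvLeafE p) := by
  unfold pvStepA pvLeafS pvLeafE
  cases hs : (PySem.Dict.mk (((PySem.Dict.mk p.1).get? "source_ref").getD [])).get? "start_block" <;>
    cases he : (PySem.Dict.mk (((PySem.Dict.mk p.1).get? "source_ref").getD [])).get? "end_block" <;>
      simp only [hs, he] <;> (try split_ifs) <;> simp

theorem pvFoldA_eq (l : List ((List (String × List (String × Int))) × String))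
    (acc : List Int × List Int) :
    l.foldl pvStepA acc = (acc.1 ++ l.flatMap pvLeafS, acc.2 ++ l.flatMap pvLeafE) := by
  induction l generalizing acc with
  | nil => simp
  | cons p t ih => simp [pvStepA_eq, ih, List.append_assoc]

theorem pv_foldl_min_comm (u : List Int) (a b : Int) :
    u.foldl min (min a b) = min a (u.foldl min b) := by
  induction u generalizing b with
  | nil => rfl
  | cons c u ih => simp only [List.foldl_cons, min_assoc, ih]

theorem pv_foldl_max_comm (u : List Int) (a b : Int) :
    u.foldl max (max a b) = max a (u.foldl max b) := by
  induction u generalizing b with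
  | nil => rfl
  | cons c u ih => simp only [List.foldl_cons, max_assoc, ih]

theorem pvOmin_none_left (b : Option Int) : pvOmin none b = b := by cases b <;> rfl

theorem pvOmax_none_left (b : Option Int) : pvOmax none b = b := by cases b <;> rfl

theorem pv_min_append (xs ys : List Int) :
    PySem.List.min? (xs ++ ys) (fun x => x)
      = pvOmin (PySem.List.min? xs (fun x => x)) (PySem.List.min? ys (fun x => x)) := by
  cases xs with
  | nil => simp [PySem.List.min?, pvOmin_none_left]
  | cons x t =>
    cases ys with
    | nil => simp [pvOmin, PySem.List.min?]
    | cons y u =>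
      simp [PySem.List.min?_id_cons, pvOmin, List.foldl_append, pv_foldl_min_comm]

theorem pv_max_append (xs ys : List Int) :
    PySem.List.max? (xs ++ ys) (fun x => x)
      = pvOmax (PySem.List.max? xs (fun x => x)) (PySem.List.max? ys (fun x => x)) := by
  cases xs with
  | nil => simp [PySem.List.max?, pvOmax_none_left]
  | cons x t =>
    cases ys with
    | nil => simp [pvOmax, PySem.List.max?]
    | cons y u =>
      simp [PySem.List.max?_id_cons, pvOmax, List.foldl_append, pv_foldl_max_comm]

-- the segment of the list B's (lo, hi) range covers
def pvSeg (np : List ((List (String × List (String × Int))) × String)) (lo hi : Nat) :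
    List ((List (String × List (String × Int))) × String) :=
  (np.drop lo).take (hi - lo)

theorem pvSpans_eq (np : List ((List (String × List (String × Int))) × String))
    (lo hi : Nat) (h1 : lo ≤ hi) (h2 : hi ≤ np.length) :
    pvSpans np lo hi
      = (PySem.List.min? ((pvSeg np lo hi).flatMap pvLeafS) (fun x => x),
         PySem.List.max? ((pvSeg np lo hi).flatMap pvLeafE) (fun x => x)) := by
  generalize hn : hi - lo = n
  induction n using Nat.strong_induction_on generalizing lo hi with
  | _ n ih =>
    cases n with
    | zero =>
      rw [pvSpans]
      simp [hn, pvSeg, PySem.List.min?, PySem.List.max?]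
    | succ m =>
      cases m with
      | zero =>
        rw [pvSpans]
        have hlo : lo < np.length := by omega
        have hget : np[lo]? = some np[lo] := List.getElem?_eq_getElem hlo
        have hseg : pvSeg np lo hi = [np[lo]] := by
          unfold pvSeg
          rw [hn, show List.drop lo np = np[lo] :: List.drop (lo + 1) np from
            List.drop_eq_getElem_cons hlo]
          rfl
        simp only [hn] at *
        rw [pvSpans]
        simp only [hseg, hget]
        norm_num
        cases hs : (PySem.Dict.mk (((PySem.Dict.mk (np[lo]).1).get? "source_ref").getD [])).get? "start_block" <;>
          cases he : (PySem.Dict.mk (((PySem.Dict.mk (np[lo]).1).get? "source_ref").getD [])).get? "end_block" <;>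
            simp [pvLeafS, pvLeafE, hs, he] <;> (try split_ifs) <;>
              simp [PySem.List.min?, PySem.List.max?]
      | succ k =>
        rw [pvSpans]
        have hcond : ¬ (hi - lo = 0) := by omega
        have hcond1 : ¬ (hi - lo = 1) := by omega
        simp only [hcond, hcond1, if_false]
        have hm1 : lo ≤ (lo + hi) / 2 := by omega
        have hm2 : (lo + hi) / 2 ≤ hi := by omega
        have e1 := ih ((lo + hi) / 2 - lo) (by omega) lo ((lo + hi) / 2) (by omega) (by omega) rfl
        have e2 := ih (hi - (lo + hi) / 2) (by omega) ((lo + hi) / 2) hi (by omega) h2 rfl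
        rw [e1, e2]
        have hseg : pvSeg np lo hi = pvSeg np lo ((lo + hi) / 2) ++ pvSeg np ((lo + hi) / 2) hi := by
          unfold pvSeg
          rw [← List.take_append_drop ((lo + hi) / 2 - lo) ((np.drop lo).take (hi - lo))]
          congr 1
          · rw [List.take_take]
            congr 1
            omega
          · rw [List.drop_take, List.drop_drop]
            congr 1 <;> first | omega | (congr 1 <;> omega)
        rw [hseg, List.flatMap_append, List.flatMap_append, pv_min_append, pv_max_append]

-- ===== VERDICT =====
theorem descendant_span_py_spec : Claim_equal_descendant_span_py := by
  intro node_pairs _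
  unfold Spec_descendant_span_py descendant_span_py descendant_span_py_alt
  have hB := pvSpans_eq node_pairs 0 node_pairs.length (by omega) (by omega)
  have hseg : pvSeg node_pairs 0 node_pairs.length = node_pairs := by
    simp [pvSeg]
  rw [hseg] at hB
  rw [pvFoldA_eq, hB]
  simp only [List.nil_append]
  by_cases hS : node_pairs.flatMap pvLeafS = []
  · simp [hS, PySem.List.min?]
  · by_cases hE : node_pairs.flatMap pvLeafE = []
    · simp [hE, PySem.List.max?]
    · have h1 : PySem.List.min? (node_pairs.flatMap pvLeafS) (fun x => x) ≠ none := by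
        rw [Ne, PySem.List.min?_eq_none_iff]; exact hS
      have h2 : PySem.List.max? (node_pairs.flatMap pvLeafE) (fun x => x) ≠ none := by
        rw [Ne, PySem.List.max?_eq_none_iff]; exact hE
      simp [hS, hE, h1, h2]
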